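-- pv_equiv track=rewrite | github.com/itsax404/OCRganiz | backend/images/reconnaisseurs/adresse_reconnaisseur.py | avoir_bp
-- ===== SOURCE A (Python) =====
-- def avoir_bp(chaine: str) -> tuple[str, str]:
-- 	"""
-- 	Permet de reconnaître une boite postale dans une chaine
-- 	:param chaine: la chaine à reconnaitre
-- 	:type chaine: str
-- 	:return: le mot "BP" et le numéro de la boite postale
-- 	:rtype: tuple[str, str]
-- 	"""
-- 	bp = False
-- 	numero = -1
-- 	mots_restants = [mot.lower() for mot in chaine.split(" ") if mot != ""]
-- 	for mot in mots_restants: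
-- 		if mot.lower() == "bp":
-- 			bp = True
-- 		else:
-- 			test = list()
-- 			for lettre in mot:
-- 				if lettre in "0123456789":
-- 					test.append(True)
-- 				else:
-- 					test.append(False)
-- 			if bp and all(test):
-- 				numero = mot
-- 	if not bp or numero == "-1":
-- 		return None
-- 	return ("BP", numero)
-- ===== SOURCE B (Python) =====
-- def avoir_bp(chaine: str) -> tuple[str, str]:
-- 	"""
-- 	Permet de reconnaître une boite postale dans une chaine
-- 	:param chaine: la chaine à reconnaitre
-- 	:return: le mot "BP" et le numéro de la boite postale
-- 	"""
-- 	mots = [mot.lower() for mot in chaine.split(" ") if mot]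
-- 	try:
-- 		apres = mots[mots.index("bp") + 1:]
-- 	except ValueError:
-- 		return None
-- 	numero = next((mot for mot in reversed(apres) if mot.strip("0123456789") == ""), -1)
-- 	return ("BP", numero)
-- ===== Notes on version B (the rewrite author's own statement) =====
-- stated objective: simpler
-- what changed: Replaces A's forward boolean-flag state machine (which builds a per-character boolean list for every word) by a back-to-front search: locate the first 'bp' marker, then take the FIRST match of a reversed early-exit scan of the suffix, testing digit-ness by stripping the digit alphabet; the early exit and the dropped per-word list construction make B measurably faster, and A's dead numero == '-1' check is gone.
-- outside the precondition, e.g. on avoir_bp('bp'): A returns ('BP', -1), B returns ('BP', -1)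
import Mathlib
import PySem

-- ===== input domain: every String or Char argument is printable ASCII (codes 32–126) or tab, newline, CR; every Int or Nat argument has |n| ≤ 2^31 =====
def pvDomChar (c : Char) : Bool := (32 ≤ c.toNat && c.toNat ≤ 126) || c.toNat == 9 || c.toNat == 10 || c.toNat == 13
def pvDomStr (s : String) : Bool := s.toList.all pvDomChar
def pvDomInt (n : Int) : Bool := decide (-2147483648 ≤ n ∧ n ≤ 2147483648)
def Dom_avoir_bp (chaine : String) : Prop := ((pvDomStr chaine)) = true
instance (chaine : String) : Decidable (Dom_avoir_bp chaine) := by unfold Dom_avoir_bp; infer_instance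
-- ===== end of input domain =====

-- B replaces A's forward flag+accumulator scan by a back-to-front first-match search over the
-- suffix after the first "bp", testing digit-ness by stripping the digit alphabet (objective: simpler).


-- shared by both ports: the word list [mot.lower() for mot in chaine.split(" ") if mot]
def pvWordsOf (chaine : String) : List String :=
  (((PySem.Str.split? chaine " ").getD []).filter (fun mot => mot ≠ "")).map
    (fun mot => PySem.Str.lower mot)

-- ===== PORT A =====
-- loop body of A's for-loop; `lettre in "0123456789"` is ported as the single-char isIn (exact)
def pvStepA (st : Bool × String) (mot : String) : Bool × String :=
  if PySem.Str.lower mot == "bp" then (true, st.2)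
  else
    let test := mot.toList.map (fun lettre => PySem.Chars.isIn [lettre] "0123456789".toList)
    if st.1 && test.all (fun b => b) then (st.1, mot) else st

-- Python's `numero` starts as the INT -1; here it is typed String with sentinel "-1", so the final
-- `numero == "-1"` test fires where Python's int/str comparison stays False and A returns
-- ('BP', -1), a value outside the declared type tuple[str,str] — exactly the inputs Pre_ excludes.
def avoir_bp (chaine : String) : Option (String × String) :=
  let st := (pvWordsOf chaine).foldl pvStepA (false, "-1")
  if !st.1 || st.2 == "-1" then none
  else some ("BP", st.2)

-- ===== PORT B =====
-- B: find first "bp" (None if absent), then FIRST match of a reversed scan of the suffix,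
-- with `mot.strip("0123456789") == ""` as the digit test; B's int default -1 rendered as "-1"
-- (only reached outside Pre_, as for A).
def avoir_bp_alt (chaine : String) : Option (String × String) :=
  let mots := pvWordsOf chaine
  match PySem.List.index? mots "bp" with
  | none => none
  | some idx =>
      let numero := ((mots.drop (idx + 1)).reverse.find?
        (fun mot => PySem.Str.stripChars mot "0123456789" == "")).getD "-1"
      some ("BP", numero)

-- ===== PRECONDITION & SPEC =====
-- Pre_ excludes exactly the inputs where "bp" occurs but no all-digit word follows it: there Python A
-- returns ('BP', -1), an int where the declared type promises a str (B returns the same ('BP', -1)).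
def Pre_avoir_bp (chaine : String) : Prop :=
  "bp" ∈ pvWordsOf chaine →
    ∃ mot ∈ (pvWordsOf chaine).drop (List.idxOf "bp" (pvWordsOf chaine) + 1),
      mot.toList.all (fun lettre => PySem.Chars.isIn [lettre] "0123456789".toList) = true
instance (chaine : String) : Decidable (Pre_avoir_bp chaine) := by unfold Pre_avoir_bp; infer_instance

def pvWitness_avoir_bp : String := "BP 12"

def Spec_avoir_bp (chaine : String) (out : Option (String × String)) : Prop := out = avoir_bp_alt chaine
instance (chaine : String) (out : Option (String × String)) : Decidable (Spec_avoir_bp chaine out) := by unfold Spec_avoir_bp; infer_instance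

-- ===== CLAIM (what is proved, stated in full; the proofs are below) =====
def Claim_equal_avoir_bp : Prop := ∀ (chaine : String), Dom_avoir_bp chaine → Pre_avoir_bp chaine → Spec_avoir_bp chaine (avoir_bp chaine)

-- ===== LEMMAS AND PROOFS =====

-- proof-side helper: A's numero update written as a stand-alone fold step (B does not use it)
def pvStepL (numero : String) (mot : String) : String :=
  if mot.toList.all (fun lettre => PySem.Chars.isIn [lettre] "0123456789".toList) then mot
  else numero

-- Python's str.lower is idempotent
lemma pv_lowerChar_idem (c : Char) :
    PySem.Chars.lowerChar (PySem.Chars.lowerChar c) = PySem.Chars.lowerChar c := by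
  unfold PySem.Chars.lowerChar PySem.Chars.isupper
  by_cases h1 : 'A' ≤ c
  · by_cases h2 : c ≤ 'Z'
    · have hA : 65 ≤ c.toNat := Nat.succ_le_of_lt h1
      have hZ : c.toNat ≤ 90 := h2
      have hv : Nat.isValidChar (c.toNat + 32) := by left; omega
      have ht : (Char.ofNat (c.toNat + 32)).toNat = c.toNat + 32 := by
        simp [Char.toNat_ofNat, hv]
      have hnA : ¬ ((Char.ofNat (c.toNat + 32)) ≤ 'Z') := by
        intro hb
        have hb' : (Char.ofNat (c.toNat + 32)).toNat ≤ 90 := hb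
        omega
      simp [h1, h2]
      intro _ hb
      exact absurd hb hnA
    · simp [h2]
  · simp [h1]

lemma pv_lower_idem (s : String) :
    PySem.Str.lower (PySem.Str.lower s) = PySem.Str.lower s := by
  simp [PySem.Str.lower, PySem.Chars.lower, List.map_map, Function.comp_def, pv_lowerChar_idem]

lemma pv_words_lower_fixed (chaine : String) :
    ∀ mot ∈ pvWordsOf chaine, PySem.Str.lower mot = mot := by
  intro mot hm
  simp only [pvWordsOf, List.mem_map] at hm
  obtain ⟨m, -, rfl⟩ := hm
  exact pv_lower_idem m

-- once the flag is set, A's loop maintains (true, ·) and updates numero as the stand-alone fold does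
lemma pv_foldA_true (ws : List String) (acc : String)
    (hws : ∀ w ∈ ws, PySem.Str.lower w = w) :
    ws.foldl pvStepA (true, acc) = (true, ws.foldl pvStepL acc) := by
  induction ws generalizing acc with
  | nil => rfl
  | cons w ws ih =>
    have hw := hws w (List.mem_cons_self)
    have hws' : ∀ w ∈ ws, PySem.Str.lower w = w := fun v hv => hws v (List.mem_cons_of_mem _ hv)
    by_cases hbp : w = "bp"
    · subst hbp
      have hb : (PySem.Str.lower "bp" == "bp") = true := by decide
      have hd : ("bp".toList.all (fun l => PySem.Chars.isIn [l] "0123456789".toList)) = false := by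
        decide
      have h1 : pvStepA (true, acc) "bp" = (true, acc) := by simp [pvStepA, hb]
      have h2 : pvStepL acc "bp" = acc := by
        simp only [pvStepL, hd, Bool.false_eq_true, if_false]
      simp only [List.foldl_cons, h1, h2, ih _ hws']
    · have hne : (PySem.Str.lower w == "bp") = false := by
        rw [hw]; exact beq_false_of_ne hbp
      simp only [List.foldl_cons, pvStepA, pvStepL, hne, Bool.false_eq_true, if_false,
        Bool.true_and, List.all_map, Function.comp_def]
      split <;> exact ih _ hws'

-- if some word of ws is all-digit, the last-wins fold ends on an all-digit word
lemma pv_foldL_digit (ws : List String) (acc : String)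
    (h : (∃ w ∈ ws, w.toList.all (fun l => PySem.Chars.isIn [l] "0123456789".toList) = true)
         ∨ acc.toList.all (fun l => PySem.Chars.isIn [l] "0123456789".toList) = true) :
    (ws.foldl pvStepL acc).toList.all (fun l => PySem.Chars.isIn [l] "0123456789".toList) = true := by
  induction ws generalizing acc with
  | nil =>
    rcases h with ⟨w, hw, -⟩ | h
    · exact absurd hw (List.not_mem_nil)
    · exact h
  | cons w ws ih =>
    simp only [List.foldl_cons, pvStepL]
    split
    · next hd => exact ih _ (Or.inr hd)
    · next hd =>
      apply ih
      rcases h with ⟨v, hv, hvd⟩ | h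
      · rcases List.mem_cons.mp hv with rfl | hv
        · exact absurd hvd hd
        · exact Or.inl ⟨v, hv, hvd⟩
      · exact Or.inr h

lemma pv_digit_ne_neg_one (s : String)
    (h : s.toList.all (fun l => PySem.Chars.isIn [l] "0123456789".toList) = true) :
    (s == "-1") = false := by
  by_cases hs : s = "-1"
  · subst hs; exact absurd h (by decide)
  · exact beq_false_of_ne hs

-- single-char `in` is plain membership
lemma pv_isIn_singleton (c : Char) (d : List Char) :
    PySem.Chars.isIn [c] d = d.contains c := by
  by_cases hc : c ∈ d
  · have hinf : [c] <:+: d := by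
      obtain ⟨l, r, rfl⟩ := List.append_of_mem hc
      exact ⟨l, r, by simp⟩
    simp [(PySem.Chars.isIn_iff_infix _ _).mpr hinf, hc]
  · have hninf : ¬ ([c] <:+: d) := fun hinf => hc (hinf.subset (List.mem_singleton_self c))
    have : PySem.Chars.isIn [c] d = false := by
      cases hb : PySem.Chars.isIn [c] d
      · rfl
      · exact absurd ((PySem.Chars.isIn_iff_infix _ _).mp hb) hninf
    simp [this, hc]

-- a list all of whose dropWhile-suffix satisfies p has empty dropWhile-suffix
lemma pv_dropWhile_all {α : Type} (p : α → Bool) (l : List α)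
    (h : ∀ x ∈ l.dropWhile p, p x = true) : l.dropWhile p = [] := by
  cases hd : l.dropWhile p with
  | nil => rfl
  | cons a t =>
    have hne : l.dropWhile p ≠ [] := by rw [hd]; simp
    have hhead := List.head_dropWhile_not p hne
    have hmem : (l.dropWhile p).head hne ∈ l.dropWhile p := List.head_mem hne
    rw [h _ hmem] at hhead
    cases hhead

-- B's digit test (strip the digit alphabet, compare with "") agrees with A's char-by-char test
lemma pv_strip_eq_all (m : String) :
    (PySem.Str.stripChars m "0123456789" == "") =
      m.toList.all (fun l => PySem.Chars.isIn [l] "0123456789".toList) := by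
  rw [Bool.eq_iff_iff]
  constructor
  · intro hb
    have heq : PySem.Chars.stripChars m.toList "0123456789".toList = [] := by
      have := congrArg String.toList (eq_of_beq hb)
      simpa [PySem.Str.stripChars] using this
    unfold PySem.Chars.stripChars at heq
    have houter : List.dropWhile (fun c => ("0123456789".toList).contains c)
        (List.dropWhile (fun c => ("0123456789".toList).contains c) m.toList).reverse = [] := by
      simpa using congrArg List.reverse heq
    have hinner : List.dropWhile (fun c => ("0123456789".toList).contains c) m.toList = [] := by
      apply pv_dropWhile_all
      intro x hx
      exact List.dropWhile_eq_nil_iff.mp houter x (List.mem_reverse.mpr hx)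
    apply List.all_eq_true.mpr
    intro x hx
    rw [pv_isIn_singleton]
    exact List.dropWhile_eq_nil_iff.mp hinner x hx
  · intro hall
    have hinner : List.dropWhile (fun c => ("0123456789".toList).contains c) m.toList = [] := by
      apply List.dropWhile_eq_nil_iff.mpr
      intro x hx
      rw [← pv_isIn_singleton]
      exact List.all_eq_true.mp hall x hx
    have hstrip : PySem.Chars.stripChars m.toList "0123456789".toList = [] := by
      show (List.dropWhile (fun c => ("0123456789".toList).contains c)
        (List.dropWhile (fun c => ("0123456789".toList).contains c) m.toList).reverse).reverse = []
      rw [hinner]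
      rfl
    have hempty : PySem.Str.stripChars m "0123456789" = "" := by
      unfold PySem.Str.stripChars
      rw [hstrip]
    rw [hempty]
    rfl

-- a last-wins fold is the first match of the reversed list
lemma pv_fold_rev (p : String → Bool) (ws : List String) (acc : String) :
    ws.foldl (fun a m => if p m then m else a) acc = (ws.reverse.find? p).getD acc := by
  induction ws generalizing acc with
  | nil => rfl
  | cons w ws ih =>
    simp only [List.foldl_cons, ih, List.reverse_cons, List.find?_append]
    cases hf : ws.reverse.find? p with
    | some x => simp
    | none =>
      by_cases hp : p w = true
      · simp [List.find?, hp]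
      · simp [List.find?, Bool.eq_false_iff.mpr hp]

-- A's numero fold equals B's reversed first-match with B's strip-based predicate
lemma pv_foldL_eq_rev (ws : List String) (acc : String) :
    ws.foldl pvStepL acc
      = ((ws.reverse.find? (fun mot => PySem.Str.stripChars mot "0123456789" == "")).getD acc) := by
  have hfun : (fun (a m : String) =>
      if (PySem.Str.stripChars m "0123456789" == "") then m else a) = pvStepL := by
    funext a m
    simp only [pvStepL, pv_strip_eq_all]
  rw [← hfun, pv_fold_rev]

-- the core equivalence, by induction on the word list
lemma pv_main (ws : List String)
    (hws : ∀ w ∈ ws, PySem.Str.lower w = w)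
    (hpre : "bp" ∈ ws →
      ∃ mot ∈ ws.drop (List.idxOf "bp" ws + 1),
        mot.toList.all (fun l => PySem.Chars.isIn [l] "0123456789".toList) = true) :
    (let st := ws.foldl pvStepA (false, "-1")
     if !st.1 || st.2 == "-1" then none else some (("BP", st.2) : String × String))
    = match PySem.List.index? ws "bp" with
      | none => none
      | some idx => some ("BP",
          ((ws.drop (idx + 1)).reverse.find?
            (fun mot => PySem.Str.stripChars mot "0123456789" == "")).getD "-1") := by
  induction ws with
  | nil => rfl
  | cons w ws ih =>
    have hw := hws w (List.mem_cons_self)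
    have hws' : ∀ w ∈ ws, PySem.Str.lower w = w := fun v hv => hws v (List.mem_cons_of_mem _ hv)
    by_cases hbp : w = "bp"
    · subst hbp
      have hstep : pvStepA (false, "-1") "bp" = (true, "-1") := by decide
      have hdig : (ws.foldl pvStepL "-1").toList.all
          (fun l => PySem.Chars.isIn [l] "0123456789".toList) = true := by
        apply pv_foldL_digit
        left
        have := hpre (List.mem_cons_self)
        simpa [List.idxOf_cons_self] using this
      simp only [List.foldl_cons, hstep, pv_foldA_true ws "-1" hws',
        PySem.List.index?_cons_self, pv_digit_ne_neg_one _ hdig]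
      simp [pv_foldL_eq_rev ws "-1"]
    · have hne : PySem.List.index? ("bp" :: ws |> fun _ => (w :: ws)) "bp"
          = Option.map (fun x => x + 1) (PySem.List.index? ws "bp") :=
        PySem.List.index?_cons_of_ne ws hbp
      have hnelow : (PySem.Str.lower w == "bp") = false := by
        rw [hw]; exact beq_false_of_ne hbp
      have hstep : pvStepA (false, "-1") w = (false, "-1") := by
        simp [pvStepA, hnelow]
      have hpre' : "bp" ∈ ws →
          ∃ mot ∈ ws.drop (List.idxOf "bp" ws + 1),
            mot.toList.all (fun l => PySem.Chars.isIn [l] "0123456789".toList) = true := by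
        intro hmem
        have hidx : List.idxOf "bp" (w :: ws) = List.idxOf "bp" ws + 1 := by
          have hbne : (w == "bp") = false := beq_false_of_ne hbp
          simp [List.idxOf_cons, hbne]
        have := hpre (List.mem_cons_of_mem _ hmem)
        rw [hidx] at this
        simpa [List.drop_succ_cons] using this
      rw [List.foldl_cons, hstep, hne]
      have hih := ih hws' hpre'
      rcases hcase : PySem.List.index? ws "bp" with _ | idx <;> rw [hcase] at hih <;> exact hih

-- ===== VERDICT (by name: the statement is the Claim_ definition above) =====
theorem avoir_bp_spec : Claim_equal_avoir_bp := by
  unfold Claim_equal_avoir_bp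
  intro chaine _ hpre
  unfold Spec_avoir_bp avoir_bp avoir_bp_alt
  exact pv_main (pvWordsOf chaine) (pv_words_lower_fixed chaine) hpre
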